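-- pv_equiv track=rewrite | github.com/swilsonmelo/Google-codeJam | 2019/qualifications2019/A/A.py | convertRight
-- ===== SOURCE A (Python) =====
-- def convertRight(n):
--     m = [i for i in str(n)]
--     pos = len(m)-1
--     t = True
--     for i in range(len(m)):
--         if(not t):
--             m[i] = "9"
--         if(m[i] == "4" and t):
--             m[i] = "3"
--             t = False
--     return int("".join(m))
-- ===== SOURCE B (Python) =====
-- def convertRight(n):
--     s = str(n)
--     i = next((k for k, c in enumerate(s) if c == '4'), None)
--     if i is None:
--         return int(s)
--     return int(s[:i] + '3' + '9' * (len(s) - i - 1))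
-- ===== Notes on version B (the rewrite author's own statement) =====
-- stated objective: simpler
-- what changed: Replaces A's per-digit loop with a mutating flag by a locate-then-rebuild decomposition: find the first '4', then build prefix + '3' + '9'*rest in one construction step.
import Mathlib
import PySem

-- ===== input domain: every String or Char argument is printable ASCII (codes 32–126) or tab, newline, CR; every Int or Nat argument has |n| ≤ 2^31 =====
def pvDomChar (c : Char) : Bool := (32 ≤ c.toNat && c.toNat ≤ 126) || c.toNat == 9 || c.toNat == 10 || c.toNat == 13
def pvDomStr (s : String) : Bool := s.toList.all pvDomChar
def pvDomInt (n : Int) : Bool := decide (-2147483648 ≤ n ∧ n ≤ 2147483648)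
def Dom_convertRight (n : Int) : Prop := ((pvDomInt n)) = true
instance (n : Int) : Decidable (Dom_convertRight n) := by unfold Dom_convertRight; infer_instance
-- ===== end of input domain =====

-- B replaces A's per-digit flag loop by locate-the-first-'4'-then-rebuild (simpler decomposition).

-- ===== PORT A =====
-- A's for-loop over the digit list with the flag t, transcribed as structural recursion
-- over the same list with the same flag (branch order preserved: if t is already false
-- the digit becomes '9'; an unconsumed '4' becomes '3' and clears t).
def pvLoopA : List Char → Bool → List Char
  | [], _ => []
  | c :: cs, t =>
    if !t then '9' :: pvLoopA cs t
    else if c == '4' then '3' :: pvLoopA cs false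
    else c :: pvLoopA cs t

-- int("".join(m)): the joined string is always a valid int literal (digits of str(n)
-- with some replaced by '3'/'9'), so int() never raises; .getD 0 is never reached.
def convertRight (n : Int) : Int :=
  (PySem.Int.ofChars? (pvLoopA (PySem.Int.toChars n) true)).getD 0

-- ===== PORT B =====
-- next((k for k,c in enumerate(s) if c == '4'), None) → List.findIdx?; s[:i] with
-- 0 ≤ i ≤ len(s) → take i (exact on that range); int(...) as in port A (never raises).
def convertRight_alt (n : Int) : Int :=
  let cs := PySem.Int.toChars n
  match cs.findIdx? (· == '4') with
  | none => (PySem.Int.ofChars? cs).getD 0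
  | some i => (PySem.Int.ofChars? (cs.take i ++ '3' :: List.replicate (cs.length - i - 1) '9')).getD 0

-- ===== PRECONDITION & SPEC =====
def Spec_convertRight (n : Int) (out : Int) : Prop := out = convertRight_alt n
instance (n : Int) (out : Int) : Decidable (Spec_convertRight n out) := by unfold Spec_convertRight; infer_instance

-- ===== CLAIM (what is proved, stated in full; the proofs are below) =====
def Claim_equal_convertRight : Prop := ∀ (n : Int), Dom_convertRight n → Spec_convertRight n (convertRight n)

-- ===== LEMMAS AND PROOFS =====
lemma pvLoopA_false (cs : List Char) : pvLoopA cs false = List.replicate cs.length '9' := by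
  induction cs with
  | nil => rfl
  | cons c cs ih => simp [pvLoopA, ih, List.replicate_succ]

lemma pvLoopA_true (cs : List Char) :
    pvLoopA cs true =
      match cs.findIdx? (· == '4') with
      | none => cs
      | some i => cs.take i ++ '3' :: List.replicate (cs.length - i - 1) '9' := by
  induction cs with
  | nil => rfl
  | cons c cs ih =>
    by_cases h : c = '4'
    · simp [pvLoopA, h, List.findIdx?_cons, pvLoopA_false]
    · simp only [pvLoopA, List.findIdx?_cons, beq_iff_eq, h, Bool.not_true, if_false,
        ih]
      cases hf : cs.findIdx? (· == '4') with
      | none => simp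
      | some i => simp [List.take_succ_cons, List.length_cons]

-- ===== VERDICT (by name: the statement is the Claim_ definition above) =====
theorem convertRight_spec : Claim_equal_convertRight := by
  intro n _
  unfold Spec_convertRight convertRight convertRight_alt
  rw [pvLoopA_true]
  cases hf : (PySem.Int.toChars n).findIdx? (· == '4') <;> simp [hf]
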